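-- pv_equiv track=rewrite | github.com/L-Q-Y/CRISPRtool | crisprtool/cas9_design.py | construct_combinations
-- ===== SOURCE A (Python) =====
-- def apply_mutation(ref_sequence, offset, ref, alt):
--     """
--     Apply a single mutation to the sequence.
--     """
--     if len(ref) == len(alt) and alt != "*":  # SNV
--         mutated_seq = ref_sequence[:offset] + alt + ref_sequence[offset+len(alt):]
--
--     elif len(ref) < len(alt):  # Insertion
--         mutated_seq = ref_sequence[:offset] + alt + ref_sequence[offset+1:]
--
--     elif len(ref) == len(alt) and alt == "*":  # Deletion
--         mutated_seq = ref_sequence[:offset] + ref_sequence[offset+1:]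
--
--     elif len(ref) > len(alt) and alt != "*":  # Deletion
--         mutated_seq = ref_sequence[:offset] + alt + ref_sequence[offset+len(ref):]
--
--     elif len(ref) > len(alt) and alt == "*":  # Deletion
--         mutated_seq = ref_sequence[:offset] + ref_sequence[offset+len(ref):]
--
--     return mutated_seq
--
-- def construct_combinations(sequence, mutations):
--     """
--     Construct all combinations of mutations.
--     mutations is a list of tuples (position, ref, [alts])
--     """
--     if not mutations:
--         return [sequence]
--
--     # Take the first mutation and recursively construct combinations for the rest
--     first_mutation = mutations[0]
--     rest_mutations = mutations[1:]
--     offset, ref, alts = first_mutation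
--
--     sequences = []
--     for alt in alts:
--         mutated_sequence = apply_mutation(sequence, offset, ref, alt)
--         sequences.extend(construct_combinations(mutated_sequence, rest_mutations))
--
--     return sequences
-- ===== SOURCE B (Python) =====
-- def _edit(ref, alt):
--     """Reduce a mutation to a single splice: (insert string, ref-span length to skip)."""
--     if len(ref) < len(alt):
--         return alt, 1
--     ins = "" if alt == "*" else alt
--     return ins, len(ref) if len(ref) > len(alt) else len(alt)
--
--
-- def construct_combinations(sequence, mutations):
--     """
--     Construct all combinations of mutations, iteratively: enumerate every
--     choice of one alt per mutation (last mutation varying fastest), then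
--     apply each chosen combination to the original sequence as plain splices.
--     """
--     combos = [[]]
--     for _, _, alts in mutations:
--         combos = [c + [alt] for c in combos for alt in alts]
--
--     result = []
--     for combo in combos:
--         seq = sequence
--         for (offset, ref, _), alt in zip(mutations, combo):
--             ins, skip = _edit(ref, alt)
--             seq = seq[:offset] + ins + seq[offset + skip:]
--         result.append(seq)
--     return result
-- ===== Notes on version B (the rewrite author's own statement) =====
-- stated objective: alternative
-- what changed: Replaced A's DFS recursion and its five-branch apply_mutation by an iterative two-phase pass: first build all alt-combinations with a product loop, then apply each combination to the original sequence via a single uniform splice seq[:offset]+ins+seq[offset+skip:], with (ins, skip) computed by a small case analysis.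
import Mathlib
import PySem

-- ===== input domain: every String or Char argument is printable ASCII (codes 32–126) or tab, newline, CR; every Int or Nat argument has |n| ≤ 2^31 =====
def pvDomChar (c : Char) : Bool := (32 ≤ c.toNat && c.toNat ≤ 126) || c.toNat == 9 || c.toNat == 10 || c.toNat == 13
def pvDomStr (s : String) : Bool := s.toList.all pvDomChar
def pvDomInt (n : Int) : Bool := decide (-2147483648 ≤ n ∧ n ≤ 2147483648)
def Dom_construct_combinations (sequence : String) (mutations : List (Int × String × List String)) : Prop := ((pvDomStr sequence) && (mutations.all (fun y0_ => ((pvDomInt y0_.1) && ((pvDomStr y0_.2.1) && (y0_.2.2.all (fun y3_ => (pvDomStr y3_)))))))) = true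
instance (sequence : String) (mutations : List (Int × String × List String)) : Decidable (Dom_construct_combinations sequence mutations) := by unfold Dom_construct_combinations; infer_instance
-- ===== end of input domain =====

-- B replaces A's recursion and five-branch apply_mutation by an iterative two-phase pass
-- (enumerate alt-combinations, then apply each as uniform splices); objective: alternative.

-- ===== PORT A =====
-- A's helper apply_mutation, branch for branch; strings through List Char / PySem slices
def apply_mutation (ref_sequence : String) (offset : Int) (ref alt : String) : String :=
  let s := ref_sequence.toList
  let a := alt.toList
  let r := ref.toList
  if r.length = a.length ∧ alt ≠ "*" then  -- SNV
    String.ofList (PySem.List.slice s none (some offset) ++ a ++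
      PySem.List.slice s (some (offset + (a.length : Int))) none)
  else if r.length < a.length then  -- Insertion
    String.ofList (PySem.List.slice s none (some offset) ++ a ++
      PySem.List.slice s (some (offset + 1)) none)
  else if r.length = a.length ∧ alt = "*" then  -- Deletion
    String.ofList (PySem.List.slice s none (some offset) ++
      PySem.List.slice s (some (offset + 1)) none)
  else if r.length > a.length ∧ alt ≠ "*" then  -- Deletion
    String.ofList (PySem.List.slice s none (some offset) ++ a ++
      PySem.List.slice s (some (offset + (r.length : Int))) none)
  else  -- len(ref) > len(alt) and alt == "*" (the remaining case)
    String.ofList (PySem.List.slice s none (some offset) ++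
      PySem.List.slice s (some (offset + (r.length : Int))) none)

def construct_combinations (sequence : String) (mutations : List (Int × String × List String)) : List String :=
  match mutations with
  | [] => [sequence]
  | (offset, ref, alts) :: rest_mutations =>
      alts.foldl
        (fun sequences alt =>
          sequences ++ construct_combinations (apply_mutation sequence offset ref alt) rest_mutations)
        []

-- ===== PORT B =====
-- _edit(ref, alt): reduce a mutation to one splice, (insert string, span length to skip)
def pvEdit (ref alt : String) : String × Int :=
  if ref.toList.length < alt.toList.length then (alt, 1)
  else
    let ins := if alt = "*" then "" else alt
    (ins, if ref.toList.length > alt.toList.length then (ref.toList.length : Int)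
          else (alt.toList.length : Int))

-- seq[:offset] + ins + seq[offset+skip:]
def pvSplice (seq : String) (offset : Int) (ins : String) (skip : Int) : String :=
  String.ofList (PySem.List.slice seq.toList none (some offset) ++ ins.toList ++
    PySem.List.slice seq.toList (some (offset + skip)) none)

-- combos = [c + [alt] for c in combos for alt in alts], one step of the loop over mutations
def pvCombosStep (combos : List (List String)) (m : Int × String × List String) : List (List String) :=
  combos.flatMap (fun c => m.2.2.map (fun alt => c ++ [alt]))

-- the inner loop: ins, skip = _edit(ref, alt); seq = splice, over zip(mutations, combo)
def pvApplyCombo (sequence : String) (mutations : List (Int × String × List String)) (combo : List String) : String :=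
  (mutations.zip combo).foldl
    (fun seq p => pvSplice seq p.1.1 (pvEdit p.1.2.1 p.2).1 (pvEdit p.1.2.1 p.2).2) sequence

def construct_combinations_alt (sequence : String) (mutations : List (Int × String × List String)) : List String :=
  let combos := mutations.foldl pvCombosStep [[]]
  combos.foldl (fun result combo => result ++ [pvApplyCombo sequence mutations combo]) []

-- ===== PRECONDITION & SPEC =====
def Spec_construct_combinations (sequence : String) (mutations : List (Int × String × List String)) (out : List String) : Prop := out = construct_combinations_alt sequence mutations
instance (sequence : String) (mutations : List (Int × String × List String)) (out : List String) : Decidable (Spec_construct_combinations sequence mutations out) := by unfold Spec_construct_combinations; infer_instance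

-- ===== CLAIM =====
def Claim_equal_construct_combinations : Prop := ∀ (sequence : String) (mutations : List (Int × String × List String)), Dom_construct_combinations sequence mutations → Spec_construct_combinations sequence mutations (construct_combinations sequence mutations)

-- ===== LEMMAS AND PROOFS =====

-- A's five-branch apply_mutation equals B's single splice with _edit's (ins, skip)
theorem apply_eq_splice (s : String) (off : Int) (ref alt : String) :
    apply_mutation s off ref alt =
      pvSplice s off (pvEdit ref alt).1 (pvEdit ref alt).2 := by
  unfold apply_mutation pvSplice pvEdit
  split_ifs with h1 h2 h3 h4 <;> simp_all <;> intros <;>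
    first
      | omega
      | (have hz : ref.length = 0 := by omega
         rw [String.length_eq_zero_iff] at hz; simp_all)
      | (rw [if_neg (by omega), if_neg (by omega)])
      | (rw [if_neg (by omega), if_pos (by omega)])
      | (rw [if_pos (by omega)])

-- folding the combo-building step from any seed factors through the seed
theorem pvCombos_seed (ms : List (Int × String × List String)) (init : List (List String)) :
    ms.foldl pvCombosStep init =
      init.flatMap (fun c => (ms.foldl pvCombosStep [[]]).map (fun t => c ++ t)) := by
  induction ms generalizing init with
  | nil => simp [List.flatMap_singleton']
  | cons m ms ih =>
      rw [List.foldl_cons, ih, List.foldl_cons, ih (pvCombosStep [[]] m)]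
      simp only [pvCombosStep, List.flatMap_assoc, List.flatMap_map, List.map_flatMap,
        List.map_map, List.flatMap_singleton, List.nil_append]
      congr 1; funext c; congr 1; funext a
      simp [Function.comp_def, List.append_assoc]

-- A's recursion computes exactly "map pvApplyCombo over the combination list"
theorem pvA_eq_map (ms : List (Int × String × List String)) (s : String) :
    construct_combinations s ms =
      (ms.foldl pvCombosStep [[]]).map (fun combo => pvApplyCombo s ms combo) := by
  induction ms generalizing s with
  | nil => simp [construct_combinations, pvApplyCombo]
  | cons m ms ih =>
      obtain ⟨offset, ref, alts⟩ := m
      rw [construct_combinations, PySem.List.foldl_append_eq_flatMap, List.nil_append,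
        List.foldl_cons, pvCombos_seed ms (pvCombosStep [[]] (offset, ref, alts))]
      simp only [pvCombosStep, List.flatMap_singleton, List.flatMap_map, List.nil_append,
        List.map_flatMap, List.map_map]
      refine congrFun (congrArg List.flatMap (funext fun alt => ?_)) alts
      rw [ih (apply_mutation s offset ref alt)]
      refine congrFun (congrArg List.map (funext fun combo => ?_)) _
      simp [pvApplyCombo, apply_eq_splice]

-- ===== VERDICT =====
theorem construct_combinations_spec : Claim_equal_construct_combinations := by
  intro sequence mutations _
  unfold Spec_construct_combinations construct_combinations_alt
  rw [PySem.List.foldl_append_eq_flatMap, List.nil_append, pvA_eq_map]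
  simp only [List.flatMap]
  induction (mutations.foldl pvCombosStep [[]]) with
  | nil => rfl
  | cons c cs ih => simp_all
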